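-- pv_equiv track=rewrite | github.com/clintjohnsn/ds-algo | arrays/medium/max-sum-increasing-subsequence.py | increasing_subseq
-- ===== SOURCE A (Python) =====
-- def increasing_subseq(arr):
--     s = arr[0]
--     gs = s
--     for i in range(1,len(arr)):
--         if arr[i] < arr[i-1]:
--                 s= arr[i]
--         else:
--             s+=arr[i]
--         gs = max(gs,s)
--     return gs
-- ===== SOURCE B (Python) =====
-- def increasing_subseq(arr):
--     # Phase 1: partition into maximal non-decreasing runs (cut where value drops).
--     runs = []
--     cur = [arr[0]]
--     last = arr[0]
--     for x in arr[1:]: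
--         if x < last:
--             runs.append(cur)
--             cur = [x]
--         else:
--             cur.append(x)
--         last = x
--     runs.append(cur)
--     # Phase 2: answer = best prefix sum over any single run.
--     best = None
--     for run in runs:
--         p = 0
--         for v in run:
--             p += v
--             if best is None or p > best:
--                 best = p
--     return best
-- ===== Notes on version B (the rewrite author's own statement) =====
-- stated objective: alternative
-- what changed: Replaces the single index-driven scan carrying a reset-or-extend running sum with a two-phase decomposition: first materialise the maximal non-decreasing runs, then take the maximum prefix sum over each run.
import Mathlib
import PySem

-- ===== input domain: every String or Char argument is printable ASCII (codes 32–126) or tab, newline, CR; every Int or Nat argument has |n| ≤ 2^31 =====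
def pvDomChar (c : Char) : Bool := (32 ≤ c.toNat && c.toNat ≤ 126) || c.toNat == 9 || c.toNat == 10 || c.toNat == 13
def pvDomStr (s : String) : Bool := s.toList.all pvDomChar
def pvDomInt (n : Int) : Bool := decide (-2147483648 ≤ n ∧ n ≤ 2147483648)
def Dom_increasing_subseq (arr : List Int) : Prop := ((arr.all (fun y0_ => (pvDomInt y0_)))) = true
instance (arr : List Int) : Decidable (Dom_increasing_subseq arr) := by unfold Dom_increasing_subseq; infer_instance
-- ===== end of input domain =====

-- B is an alternative same-cost decomposition: partition into maximal non-decreasing runs, then max prefix sum per run.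

-- ===== PORT A =====
-- single scan: running sum s resets on a drop, gs tracks the max
def increasing_subseq (arr : List Int) : Int :=
  let s0 := PySem.List.pyGetD arr 0 0
  ((PySem.List.pyRange 1 (arr.length : Int) 1).foldl
    (fun (st : Int × Int) i =>
      let s := if PySem.List.pyGetD arr i 0 < PySem.List.pyGetD arr (i - 1) 0
               then PySem.List.pyGetD arr i 0
               else st.1 + PySem.List.pyGetD arr i 0
      (s, max st.2 s)) (s0, s0)).2

-- ===== PORT B =====
-- phase 1: maximal non-decreasing runs ('cur' grows by appending, flushed on a drop)
def pvRuns (cur : List Int) (last : Int) : List Int → List (List Int)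
  | [] => [cur]
  | x :: xs => if x < last then cur :: pvRuns [x] x xs else pvRuns (cur ++ [x]) x xs

-- phase 2 inner loop: running prefix sum p, best-so-far (None → Option)
def pvRunScan (b : Option Int) (run : List Int) : Option Int :=
  (run.foldl
    (fun (st : Option Int × Int) v =>
      let p := st.2 + v
      ((match st.1 with
        | none => some p
        | some bb => some (if p > bb then p else bb)), p))
    (b, 0)).1

def increasing_subseq_alt (arr : List Int) : Int :=
  let a0 := PySem.List.pyGetD arr 0 0
  let runs := pvRuns [a0] a0 (PySem.List.slice arr (some 1) none)
  ((runs.foldl pvRunScan none).getD 0)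

-- ===== PRECONDITION & SPEC =====
-- A reads the first element up front, so the empty list (IndexError) is excluded.
def Pre_increasing_subseq (arr : List Int) : Prop := arr ≠ []
instance (arr : List Int) : Decidable (Pre_increasing_subseq arr) := by unfold Pre_increasing_subseq; infer_instance
def pvWitness_increasing_subseq : List Int := [3, -1, 2, 2, -5, 4]

def Spec_increasing_subseq (arr : List Int) (out : Int) : Prop := out = increasing_subseq_alt arr
instance (arr : List Int) (out : Int) : Decidable (Spec_increasing_subseq arr out) := by unfold Spec_increasing_subseq; infer_instance

-- ===== CLAIM (what is proved, stated in full; the proofs are below) =====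
def Claim_equal_increasing_subseq : Prop := ∀ (arr : List Int), Dom_increasing_subseq arr → Pre_increasing_subseq arr → Spec_increasing_subseq arr (increasing_subseq arr)

-- ===== LEMMAS AND PROOFS =====

-- fused single-pass reference recursion both ports are reduced to
def pvC (prev s gs : Int) : List Int → Int
  | [] => gs
  | x :: xs => pvC x (if x < prev then x else s + x) (max gs (if x < prev then x else s + x)) xs

-- Option-best variant matching B's phase-2 accumulator
def pvOC (prev s : Int) (ob : Option Int) : List Int → Option Int
  | [] => ob
  | x :: xs =>
    pvOC x (if x < prev then x else s + x)
      (match ob with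
       | none => some (if x < prev then x else s + x)
       | some bb => some (if (if x < prev then x else s + x) > bb then (if x < prev then x else s + x) else bb)) xs

theorem pvOC_some (xs : List Int) : ∀ (prev s g : Int), pvOC prev s (some g) xs = some (pvC prev s g xs) := by
  induction xs with
  | nil => intro prev s g; rfl
  | cons x t ih =>
    intro prev s g
    simp only [pvOC, pvC, ih]
    congr 2
    rw [max_def]
    split_ifs <;> omega

-- A's index loop reads (arr[i-1], arr[i]): that index stream is exactly arr.zip arr.tail
theorem pvMapAdj (arr : List Int) :
    (PySem.List.pyRange 1 (arr.length : Int) 1).map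
      (fun i => (PySem.List.pyGetD arr (i-1) 0, PySem.List.pyGetD arr i 0))
    = arr.zip arr.tail := by
  apply List.ext_getElem
  · simp [PySem.List.length_pyRange_one, List.length_zip, List.length_tail]
  · intro k h1 h2
    have hk : k < arr.length - 1 := by
      simp [PySem.List.length_pyRange_one] at h1; omega
    simp only [List.getElem_map, PySem.List.getElem_pyRange_one, List.getElem_zip]
    simp only [Prod.mk.injEq]
    constructor
    · have : (1 : Int) + k - 1 = ((k : Nat) : Int) := by omega
      rw [this, PySem.List.pyGetD_natCast]
      simp [List.getD, List.getElem?_eq_getElem (by omega : k < arr.length)]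
    · have : (1 : Int) + k = ((k + 1 : Nat) : Int) := by push_cast; ring
      rw [this, PySem.List.pyGetD_natCast]
      have hk1 : k + 1 < arr.length := by omega
      simp [List.getD, List.getElem?_eq_getElem hk1, List.getElem_tail]

-- A's loop, as a fold over adjacent pairs, is the fused recursion pvC
theorem pvFoldZip (xs : List Int) : ∀ (prev s gs : Int),
    (((prev :: xs).zip xs).foldl
      (fun (st : Int × Int) (pr : Int × Int) =>
        let v := if pr.2 < pr.1 then pr.2 else st.1 + pr.2
        (v, max st.2 v)) (s, gs)).2 = pvC prev s gs xs := by
  induction xs with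
  | nil => intro prev s gs; rfl
  | cons x t ih =>
    intro prev s gs
    simp only [List.zip_cons_cons, List.foldl_cons, pvC]
    exact ih x _ _

-- B's run partition folded with pvRunScan is the Option-best fused recursion
theorem pvFoldB (xs : List Int) : ∀ (cur : List Int) (last : Int) (b0 b : Option Int) (p : Int),
    (cur.foldl
      (fun (st : Option Int × Int) v =>
        let q := st.2 + v
        ((match st.1 with
          | none => some q
          | some bb => some (if q > bb then q else bb)), q)) (b0, 0)) = (b, p) →
    (pvRuns cur last xs).foldl pvRunScan b0 = pvOC last p b xs := by
  induction xs with
  | nil =>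
    intro cur last b0 b p h
    simp only [pvRuns, List.foldl_cons, List.foldl_nil, pvRunScan, h, pvOC]
  | cons x t ih =>
    intro cur last b0 b p h
    simp only [pvRuns]
    by_cases hx : x < last
    · rw [if_pos hx]
      simp only [List.foldl_cons]
      have hcur : pvRunScan b0 cur = b := by simp only [pvRunScan, h]
      rw [hcur]
      cases b with
      | none =>
        rw [ih [x] x (none) (some x) x (by simp)]
        simp only [pvOC, if_pos hx]
      | some bb =>
        rw [ih [x] x (some bb) (some (if x > bb then x else bb)) x (by simp)]
        simp only [pvOC, if_pos hx]
    · rw [if_neg hx]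
      cases b with
      | none =>
        rw [ih (cur ++ [x]) x b0 (some (p + x)) (p + x) (by rw [List.foldl_append, h]; simp)]
        simp only [pvOC, if_neg hx]
      | some bb =>
        rw [ih (cur ++ [x]) x b0 (some (if p + x > bb then p + x else bb)) (p + x)
              (by rw [List.foldl_append, h]; simp)]
        simp only [pvOC, if_neg hx]

-- ===== VERDICT (by name: the statement is the Claim_ definition above) =====
theorem increasing_subseq_spec : Claim_equal_increasing_subseq := by
  intro arr _ hpre
  unfold Spec_increasing_subseq
  obtain ⟨a0, rest, rfl⟩ : ∃ a0 rest, arr = a0 :: rest := by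
    cases arr with
    | nil => exact absurd rfl hpre
    | cons a0 rest => exact ⟨a0, rest, rfl⟩
  unfold increasing_subseq increasing_subseq_alt
  rw [PySem.List.slice_from_one]
  simp only [PySem.List.pyGetD_zero_cons, List.tail_cons]
  have hA : ((PySem.List.pyRange 1 (((a0 :: rest).length : Nat) : Int) 1).foldl
      (fun (st : Int × Int) i =>
        let s := if PySem.List.pyGetD (a0 :: rest) i 0 < PySem.List.pyGetD (a0 :: rest) (i - 1) 0
                 then PySem.List.pyGetD (a0 :: rest) i 0
                 else st.1 + PySem.List.pyGetD (a0 :: rest) i 0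
        (s, max st.2 s)) (a0, a0)).2 = pvC a0 a0 a0 rest := by
    have h1 : ((PySem.List.pyRange 1 (((a0 :: rest).length : Nat) : Int) 1).map
        (fun i => (PySem.List.pyGetD (a0 :: rest) (i-1) 0, PySem.List.pyGetD (a0 :: rest) i 0))).foldl
        (fun (st : Int × Int) (pr : Int × Int) =>
          let v := if pr.2 < pr.1 then pr.2 else st.1 + pr.2
          (v, max st.2 v)) (a0, a0)
        = (PySem.List.pyRange 1 (((a0 :: rest).length : Nat) : Int) 1).foldl
        (fun (st : Int × Int) i =>
          let s := if PySem.List.pyGetD (a0 :: rest) i 0 < PySem.List.pyGetD (a0 :: rest) (i - 1) 0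
                   then PySem.List.pyGetD (a0 :: rest) i 0
                   else st.1 + PySem.List.pyGetD (a0 :: rest) i 0
          (s, max st.2 s)) (a0, a0) := by
      rw [List.foldl_map]
    rw [← h1, pvMapAdj (a0 :: rest), List.tail_cons]
    exact pvFoldZip rest a0 a0 a0
  rw [hA]
  rw [pvFoldB rest [a0] a0 none (some a0) a0 (by simp)]
  rw [pvOC_some]
  rfl
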